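-- pv_equiv track=rewrite | github.com/yecastle9617-ui/test | dmalab_back/api/app.py | slugify_filename
-- ===== SOURCE A (Python) =====
-- def slugify_filename(text: str, max_length: int = 50) -> str:
--     """
--     파일명에 사용할 수 있도록 텍스트를 슬러그 형태로 변환합니다.
--     - 공백은 언더스코어로 변환
--     - 위험 문자는 제거
--     - 너무 길면 max_length 이내로 자름
--     """
--     if not text:
--         return ""
--     # 공백 → _
--     text = text.strip().replace(" ", "_")
--     # 위험 문자 제거
--     forbidden = ['/', '\\', ':', '*', '?', '"', '<', '>', '|']
--     for ch in forbidden: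
--         text = text.replace(ch, '')
--     # 길이 제한
--     if len(text) > max_length:
--         text = text[:max_length]
--     return text
-- ===== SOURCE B (Python) =====
-- def slugify_filename(text: str, max_length: int = 50) -> str:
--     forbidden = set('/\\:*?"<>|')
--     out = []
--     for ch in text.strip():
--         if ch in forbidden:
--             continue
--         out.append('_' if ch == ' ' else ch)
--     s = ''.join(out)
--     return s[:max_length] if len(s) > max_length else s
-- ===== Notes on version B (the rewrite author's own statement) =====
-- stated objective: idiomatic
-- what changed: A runs ten sequential whole-string str.replace passes (space->underscore, then one pass per forbidden character); B builds the forbidden set once and makes a single character-level pass over text.strip(), skipping forbidden characters and mapping spaces to underscores, then truncates.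
import Mathlib
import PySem

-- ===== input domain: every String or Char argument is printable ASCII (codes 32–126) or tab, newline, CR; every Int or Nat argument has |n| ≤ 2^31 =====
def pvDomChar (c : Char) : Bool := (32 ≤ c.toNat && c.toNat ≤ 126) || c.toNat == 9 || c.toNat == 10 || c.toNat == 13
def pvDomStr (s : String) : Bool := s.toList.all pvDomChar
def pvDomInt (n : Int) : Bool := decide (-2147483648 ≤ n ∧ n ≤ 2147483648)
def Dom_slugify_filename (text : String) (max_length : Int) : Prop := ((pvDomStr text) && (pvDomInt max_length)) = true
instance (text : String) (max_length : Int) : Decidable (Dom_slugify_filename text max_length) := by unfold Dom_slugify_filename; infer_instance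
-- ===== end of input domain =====

-- B replaces A's ten sequential str.replace passes by one character-level pass over text.strip() (idiomatic single pass; same result).

-- ===== PORT A =====
def slugify_filename (text : String) (max_length : Int) : String :=
  if text = "" then ""
  else
    let t1 := PySem.Str.replace (PySem.Str.strip text) " " "_"
    let forbidden : List String := ["/", "\\", ":", "*", "?", "\"", "<", ">", "|"]
    let t2 := forbidden.foldl (fun acc ch => PySem.Str.replace acc ch "") t1
    if (PySem.Str.len t2 : Int) > max_length then PySem.Str.slice t2 none (some max_length) else t2

-- ===== PORT B =====
def pvForbiddenChars : PySem.Set Char := PySem.Set.ofList ['/', '\\', ':', '*', '?', '"', '<', '>', '|']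

def slugify_filename_alt (text : String) (max_length : Int) : String :=
  let out : List Char := (PySem.Str.strip text).toList.foldl
    (fun acc c => if PySem.Set.contains pvForbiddenChars c then acc
                  else acc ++ [if c = ' ' then '_' else c]) []
  let s : String := String.ofList out
  if (out.length : Int) > max_length then PySem.Str.slice s none (some max_length) else s

-- ===== PRECONDITION & SPEC =====
def Spec_slugify_filename (text : String) (max_length : Int) (out : String) : Prop := out = slugify_filename_alt text max_length
instance (text : String) (max_length : Int) (out : String) : Decidable (Spec_slugify_filename text max_length out) := by unfold Spec_slugify_filename; infer_instance

-- ===== CLAIM (what is proved, stated in full; the proofs are below) =====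
def Claim_equal_slugify_filename : Prop := ∀ (text : String) (max_length : Int), Dom_slugify_filename text max_length → Spec_slugify_filename text max_length (slugify_filename text max_length)

-- ===== LEMMAS AND PROOFS =====

theorem pv_toList_inj {s t : String} (h : s.toList = t.toList) : s = t := by
  have := congrArg String.ofList h
  simpa using this

-- replace with a single-char pattern is a flatMap (characterisation of Chars.replace.go)
theorem pv_go_single (o : Char) (nw : List Char) :
    ∀ (l acc : List Char) (fuel : Nat), l.length ≤ fuel →
    PySem.Chars.replace.go [o] nw fuel l acc
      = acc.reverse ++ l.flatMap (fun c => if c = o then nw else [c]) := by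
  intro l
  induction l with
  | nil =>
    intro acc fuel _
    cases fuel <;> simp [PySem.Chars.replace.go]
  | cons c t ih =>
    intro acc fuel h
    cases fuel with
    | zero => simp at h
    | succ fuel =>
      by_cases hc : c = o
      · subst hc
        simp only [PySem.Chars.replace.go, List.isPrefixOf, BEq.rfl, Bool.true_and,
          if_true, List.length_cons, List.length_nil, List.drop_succ_cons, List.drop_zero]
        rw [ih (nw.reverse ++ acc) fuel (by simpa using h)]
        simp
      · have hb : ([o].isPrefixOf (c :: t)) = false := by
          simp [List.isPrefixOf]
          exact fun h' => hc h'.symm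
        simp only [PySem.Chars.replace.go, hb, Bool.false_eq_true, if_false]
        rw [ih (c :: acc) fuel (by simpa using h)]
        simp [hc]

theorem pv_replace_single (l : List Char) (o : Char) (nw : List Char) :
    PySem.Chars.replace l [o] nw = l.flatMap (fun c => if c = o then nw else [c]) := by
  rw [PySem.Chars.replace]
  simp only [List.isEmpty_cons, Bool.false_eq_true, if_false]
  rw [pv_go_single o nw l [] l.length le_rfl]
  simp

-- the per-character effect of the ten sequential replaces
theorem pv_point (c : Char) :
    List.flatMap (fun x0 => List.flatMap (fun x1 => List.flatMap (fun x2 => List.flatMap (fun x3 => List.flatMap (fun x4 => List.flatMap (fun x5 => List.flatMap (fun x6 => List.flatMap (fun x7 => List.flatMap (fun d => if d = '|' then [] else [d]) (if x7 = '>' then [] else [x7])) (if x6 = '<' then [] else [x6])) (if x5 = '\"' then [] else [x5])) (if x4 = '?' then [] else [x4])) (if x3 = '*' then [] else [x3])) (if x2 = ':' then [] else [x2])) (if x1 = '\\' then [] else [x1])) (if x0 = '/' then [] else [x0])) (if c = ' ' then ['_'] else [c])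
    = if PySem.Set.contains pvForbiddenChars c then []
      else [if c = ' ' then '_' else c] := by
  have hcont : PySem.Set.contains pvForbiddenChars c
      = List.contains ['/', '\\', ':', '*', '?', '\"', '<', '>', '|'] c := rfl
  rw [hcont]
  by_cases hc : c = ' '
  · subst hc; decide
  · simp only [hc, if_false, List.flatMap_cons, List.flatMap_nil, List.append_nil,
      List.contains_cons, List.contains_nil]
    split_ifs <;> simp_all
    all_goals tauto

-- the ten sequential single-char replaces collapse to B's one-pass fold
set_option maxHeartbeats 1000000 in
theorem pv_main_list (t : List Char) :
    PySem.Chars.replace (PySem.Chars.replace (PySem.Chars.replace (PySem.Chars.replace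
      (PySem.Chars.replace (PySem.Chars.replace (PySem.Chars.replace (PySem.Chars.replace
      (PySem.Chars.replace (PySem.Chars.replace t [' '] ['_']) ['/'] []) ['\\'] []) [':'] [])
      ['*'] []) ['?'] []) ['"'] []) ['<'] []) ['>'] []) ['|'] []
    = t.foldl (fun acc c => if PySem.Set.contains pvForbiddenChars c then acc
                  else acc ++ [if c = ' ' then '_' else c]) [] := by
  have hf : (fun (acc : List Char) (c : Char) =>
      if PySem.Set.contains pvForbiddenChars c then acc
      else acc ++ [if c = ' ' then '_' else c])
    = (fun acc c => acc ++ (if PySem.Set.contains pvForbiddenChars c then []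
      else [if c = ' ' then '_' else c])) := by
    funext acc c; split <;> simp
  rw [hf, PySem.List.foldl_append_eq_flatMap]
  simp only [List.nil_append, pv_replace_single, List.flatMap_assoc]
  exact List.flatMap_congr fun c _ => pv_point c

-- ===== VERDICT (by name: the statement is the Claim_ definition above) =====
theorem slugify_filename_spec : Claim_equal_slugify_filename := by
  intro text max_length _
  unfold Spec_slugify_filename slugify_filename slugify_filename_alt
  by_cases h0 : text = ""
  · subst h0
    have hstrip : (PySem.Str.strip "").toList = [] := by
      rw [PySem.Str.toList_strip]; decide
    rw [if_pos rfl]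
    simp only [hstrip, List.foldl_nil, List.length_nil]
    split
    · apply pv_toList_inj
      rw [PySem.Str.toList_slice]
      simp [PySem.List.slice]
    · apply pv_toList_inj
      simp
  · simp only [if_neg h0, List.foldl_cons, List.foldl_nil]
    have key : (PySem.Str.replace (PySem.Str.replace (PySem.Str.replace (PySem.Str.replace
        (PySem.Str.replace (PySem.Str.replace (PySem.Str.replace (PySem.Str.replace
        (PySem.Str.replace (PySem.Str.replace (PySem.Str.strip text) " " "_") "/" "")
        "\\" "") ":" "") "*" "") "?" "") "\"" "") "<" "") ">" "") "|" "").toList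
        = (PySem.Str.strip text).toList.foldl
            (fun acc c => if PySem.Set.contains pvForbiddenChars c then acc
              else acc ++ [if c = ' ' then '_' else c]) [] := by
      simp only [PySem.Str.toList_replace,
        show (" " : String).toList = [' '] from rfl,
        show ("_" : String).toList = ['_'] from rfl,
        show ("/" : String).toList = ['/'] from rfl,
        show ("\\" : String).toList = ['\\'] from rfl,
        show (":" : String).toList = [':'] from rfl,
        show ("*" : String).toList = ['*'] from rfl,
        show ("?" : String).toList = ['?'] from rfl,
        show ("\"" : String).toList = ['\"'] from rfl,
        show ("<" : String).toList = ['<'] from rfl,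
        show (">" : String).toList = ['>'] from rfl,
        show ("|" : String).toList = ['|'] from rfl,
        show ("" : String).toList = [] from rfl]
      exact pv_main_list _
    have hT2 := pv_toList_inj (s := PySem.Str.replace (PySem.Str.replace (PySem.Str.replace
        (PySem.Str.replace (PySem.Str.replace (PySem.Str.replace (PySem.Str.replace
        (PySem.Str.replace (PySem.Str.replace (PySem.Str.replace (PySem.Str.strip text)
        " " "_") "/" "") "\\" "") ":" "") "*" "") "?" "") "\"" "") "<" "") ">" "") "|" "")
      (t := String.ofList ((PySem.Str.strip text).toList.foldl
        (fun acc c => if PySem.Set.contains pvForbiddenChars c then acc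
          else acc ++ [if c = ' ' then '_' else c]) []))
      (by rw [key, String.toList_ofList])
    rw [hT2]
    have hlen : PySem.Str.len (String.ofList ((PySem.Str.strip text).toList.foldl
        (fun acc c => if PySem.Set.contains pvForbiddenChars c then acc
          else acc ++ [if c = ' ' then '_' else c]) []))
        = ((PySem.Str.strip text).toList.foldl
        (fun acc c => if PySem.Set.contains pvForbiddenChars c then acc
          else acc ++ [if c = ' ' then '_' else c]) []).length := by
      simp
    rw [hlen]
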